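-- pv_equiv track=rewrite | github.com/or-m-or/KT-AIVLE-School-5th_Codingmasters | example/round2/Advanced/Q8752_XOR/A8752.py | solution
-- ===== SOURCE A (Python) =====
-- def solution(nums):
--     from collections import defaultdict
--
--     n = len(nums)
--     dp = defaultdict(int)
--     dp[0] = 1  # XOR가 0인 공집합
--
--     for num in nums:
--         new_dp = dp.copy()
--         for xor_sum in dp:
--             new_xor_sum = xor_sum ^ num
--             new_dp[new_xor_sum] += dp[xor_sum]
--         dp = new_dp
--
--     return dp[0] - 1  # 공집합 제외
-- ===== SOURCE B (Python) =====
-- def solution(nums):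
--     # Group equal values with Counter; a value appearing m times contributes a
--     # closed-form factor 2**(m-1), so the dp runs once per distinct value.
--     from collections import Counter
--     dp = {0: 1}
--     for val, m in Counter(nums).items():
--         f = 1 << (m - 1)
--         new_dp = {}
--         for y, c in dp.items():
--             new_dp[y] = new_dp.get(y, 0) + c * f
--             z = y ^ val
--             new_dp[z] = new_dp.get(z, 0) + c * f
--         dp = new_dp
--     return dp[0] - 1
-- ===== Notes on version B (the rewrite author's own statement) =====
-- stated objective: alternative
-- what changed: B builds a Counter of the input once and runs the subset-XOR dp once per distinct value, folding a value's multiplicity m into the closed-form factor 2^(m-1), instead of A's one dp pass per element.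
import Mathlib
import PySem

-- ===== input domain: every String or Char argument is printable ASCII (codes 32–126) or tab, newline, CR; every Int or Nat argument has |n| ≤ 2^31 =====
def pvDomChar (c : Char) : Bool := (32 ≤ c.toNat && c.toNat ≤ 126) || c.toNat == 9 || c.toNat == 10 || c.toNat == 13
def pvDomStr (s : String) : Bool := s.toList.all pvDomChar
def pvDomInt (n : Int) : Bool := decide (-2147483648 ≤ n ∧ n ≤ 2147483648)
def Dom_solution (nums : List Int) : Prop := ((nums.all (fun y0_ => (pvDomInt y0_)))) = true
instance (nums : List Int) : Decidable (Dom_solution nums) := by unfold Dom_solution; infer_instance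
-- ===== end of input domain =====

-- B groups equal values with a Counter and handles a value of multiplicity m in one
-- dp pass with the closed-form factor 2^(m-1), instead of one dp pass per element.

-- ===== PORT A =====
-- inner loop: for xor_sum in dp: new_dp[xor_sum ^ num] += dp[xor_sum]  (new_dp starts as dp.copy())
def pvStepA (dp : PySem.Dict Int Int) (num : Int) : PySem.Dict Int Int :=
  dp.keys.foldl (fun nd k =>
    nd.insert (PySem.Int.bxor k num) (nd.getD (PySem.Int.bxor k num) 0 + dp.getD k 0)) dp

-- final 'return dp[0] - 1': dp[0] on the defaultdict returns dp.get(0, 0) (the insertion it may do is unobservable)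
def solution (nums : List Int) : Int :=
  ((nums.foldl pvStepA (PySem.Dict.empty.insert 0 1)).getD 0 0) - 1

-- ===== PORT B =====
-- inner loop: for y, c in dp.items(): new_dp[y] += c*f; new_dp[y ^ val] += c*f  (new_dp starts empty)
-- the shift amount m - 1 is nonnegative: Counter values of present elements are ≥ 1
def pvStepB (dp : PySem.Dict Int Int) (vm : Int × Int) : PySem.Dict Int Int :=
  let f : Int := (1 : Int) <<< (vm.2 - 1).toNat
  dp.items.foldl (fun nd yc =>
    let nd1 := nd.insert yc.1 (nd.getD yc.1 0 + yc.2 * f)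
    nd1.insert (PySem.Int.bxor yc.1 vm.1) (nd1.getD (PySem.Int.bxor yc.1 vm.1) 0 + yc.2 * f))
    PySem.Dict.empty

def solution_alt (nums : List Int) : Int :=
  (((PySem.Dict.counter nums).items.foldl pvStepB (PySem.Dict.empty.insert 0 1)).getD 0 0) - 1

-- ===== PRECONDITION & SPEC =====
def Spec_solution (nums : List Int) (out : Int) : Prop := out = solution_alt nums
instance (nums : List Int) (out : Int) : Decidable (Spec_solution nums out) := by unfold Spec_solution; infer_instance

-- ===== CLAIM (what is proved, stated in full; the proofs are below) =====
def Claim_equal_solution : Prop := ∀ (nums : List Int), Dom_solution nums → Spec_solution nums (solution nums)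

-- ===== LEMMAS AND PROOFS =====

-- XOR group facts specific to the two ports' use of Python '^'
theorem pvToNat_aux (n : Nat) : (-(-(n : Int) - 1) - 1).toNat = n := by omega

theorem pvBxor_assoc (a b c : Int) :
    PySem.Int.bxor (PySem.Int.bxor a b) c = PySem.Int.bxor a (PySem.Int.bxor b c) := by
  simp only [PySem.Int.bxor]
  split_ifs
  all_goals try omega
  all_goals simp_all only [Int.toNat_natCast, pvToNat_aux, Nat.xor_assoc]

theorem pvBxor_cancel (y a : Int) : PySem.Int.bxor (PySem.Int.bxor y a) a = y := by
  rw [pvBxor_assoc, PySem.Int.bxor_self, PySem.Int.bxor_zero]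

theorem pvBxor_right_comm (y a b : Int) :
    PySem.Int.bxor (PySem.Int.bxor y a) b = PySem.Int.bxor (PySem.Int.bxor y b) a := by
  rw [pvBxor_assoc, pvBxor_assoc, PySem.Int.bxor_comm a b]

-- the common specification: pvCnt l y = number of sublists of l with XOR y
def pvCnt : List Int → Int → Int
  | [], y => if y = 0 then 1 else 0
  | a :: l, y => pvCnt l y + pvCnt l (PySem.Int.bxor y a)

theorem pvCnt_perm {l l' : List Int} (h : l.Perm l') : ∀ y, pvCnt l y = pvCnt l' y := by
  induction h with
  | nil => intro y; rfl
  | cons x _ ih => intro y; simp [pvCnt, ih]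
  | swap x y l => intro z; simp only [pvCnt]; rw [pvBxor_right_comm]; ring
  | trans _ _ ih1 ih2 => intro y; rw [ih1, ih2]

theorem pvCnt_replicate (a : Int) (l : List Int) (m : Nat) (hm : 1 ≤ m) :
    ∀ y, pvCnt (List.replicate m a ++ l) y
      = 2 ^ (m - 1) * (pvCnt l y + pvCnt l (PySem.Int.bxor y a)) := by
  induction m with
  | zero => omega
  | succ m ih =>
    intro y
    rcases Nat.eq_zero_or_pos m with hm0 | hm1
    · subst hm0; simp [pvCnt]
    · have h1 : List.replicate (m + 1) a ++ l = a :: (List.replicate m a ++ l) := by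
        simp [List.replicate_succ]
      rw [h1]
      simp only [pvCnt]
      rw [ih hm1, ih hm1, pvBxor_cancel]
      have h2 : (2 : Int) ^ (m + 1 - 1) = 2 ^ (m - 1) * 2 := by
        have h3 : m + 1 - 1 = m - 1 + 1 := by omega
        rw [h3, pow_succ]
      rw [h2]; ring

-- ---- A side ----
theorem pvInnerA (dp : PySem.Dict Int Int) (num : Int) :
    ∀ (ks : List Int), ks.Nodup → ∀ (nd : PySem.Dict Int Int) (y : Int),
      (ks.foldl (fun nd k =>
          nd.insert (PySem.Int.bxor k num) (nd.getD (PySem.Int.bxor k num) 0 + dp.getD k 0)) nd).getD y 0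
        = nd.getD y 0
          + (if PySem.Int.bxor y num ∈ ks then dp.getD (PySem.Int.bxor y num) 0 else 0) := by
  intro ks
  induction ks with
  | nil => intro _ nd y; simp
  | cons k ks ih =>
    intro hnd nd y
    have hk : k ∉ ks := (List.nodup_cons.mp hnd).1
    rw [List.foldl_cons, ih (List.nodup_cons.mp hnd).2, PySem.Dict.getD_insert]
    by_cases hb : PySem.Int.bxor y num = k
    · have hyk : y = PySem.Int.bxor k num := by rw [← hb, pvBxor_cancel]
      rw [if_pos hyk, if_neg (hb ▸ hk), if_pos (by simp [hb]), hb, ← hyk]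
      ring
    · have hyk : y ≠ PySem.Int.bxor k num := fun h => hb (by rw [h, pvBxor_cancel])
      rw [if_neg hyk]
      have hmem : (PySem.Int.bxor y num ∈ k :: ks) ↔ (PySem.Int.bxor y num ∈ ks) := by
        simp [List.mem_cons, hb]
      rw [if_congr hmem rfl rfl]

theorem pvStepA_keys_nodup (dp : PySem.Dict Int Int) (num : Int) (h : dp.keys.Nodup) :
    (pvStepA dp num).keys.Nodup := by
  exact PySem.Dict.nodup_keys_foldl_insert_key dp.keys (fun k => PySem.Int.bxor k num)
    (fun nd k => nd.getD (PySem.Int.bxor k num) 0 + dp.getD k 0) dp h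

theorem pvStepA_getD (dp : PySem.Dict Int Int) (num : Int) (h : dp.keys.Nodup) (y : Int) :
    (pvStepA dp num).getD y 0 = dp.getD y 0 + dp.getD (PySem.Int.bxor y num) 0 := by
  unfold pvStepA
  rw [pvInnerA dp num dp.keys h dp y]
  by_cases hmem : PySem.Int.bxor y num ∈ dp.keys
  · simp [hmem]
  · have hc : dp.contains (PySem.Int.bxor y num) = false := by
      rw [← Bool.not_eq_true, PySem.Dict.contains_iff_mem_keys]; exact hmem
    have h0 : dp.getD (PySem.Int.bxor y num) 0 = 0 := PySem.Dict.getD_of_not_contains dp 0 hc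
    rw [if_neg hmem, h0]

theorem pvOuterA : ∀ (l : List Int) (dp : PySem.Dict Int Int) (p : List Int),
    dp.keys.Nodup → (∀ y, dp.getD y 0 = pvCnt p y) →
    ∀ y, (l.foldl pvStepA dp).getD y 0 = pvCnt (l.reverse ++ p) y := by
  intro l
  induction l with
  | nil => intro dp p _ hdp y; simpa using hdp y
  | cons a l ih =>
    intro dp p hnd hdp y
    have h1 : ((a :: l).reverse ++ p) = l.reverse ++ (a :: p) := by
      simp [List.reverse_cons, List.append_assoc]
    rw [List.foldl_cons, h1]
    exact ih (pvStepA dp a) (a :: p) (pvStepA_keys_nodup dp a hnd)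
      (fun y => by rw [pvStepA_getD dp a hnd y, hdp y, hdp (PySem.Int.bxor y a)]; rfl) y

theorem pvSolutionA (nums : List Int) : solution nums = pvCnt nums 0 - 1 := by
  unfold solution
  have hk : (PySem.Dict.empty.insert (0 : Int) (1 : Int)).keys = [0] := by decide
  have hnd : (PySem.Dict.empty.insert (0 : Int) (1 : Int)).keys.Nodup := by rw [hk]; decide
  have hdp : ∀ y, (PySem.Dict.empty.insert (0 : Int) (1 : Int)).getD y 0 = pvCnt [] y := by
    intro y
    rw [PySem.Dict.getD_insert]
    by_cases h : y = 0 <;> simp [pvCnt, h]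
  rw [pvOuterA nums _ [] hnd hdp 0, List.append_nil,
    pvCnt_perm (List.reverse_perm nums) 0]

-- ---- B side ----
theorem pvInnerB (dp : PySem.Dict Int Int) (val f : Int) :
    ∀ (ps : List (Int × Int)), (ps.map Prod.fst).Nodup →
      (∀ p ∈ ps, p.2 = dp.getD p.1 0) →
      ∀ (nd : PySem.Dict Int Int) (y : Int),
      (ps.foldl (fun nd yc =>
          (nd.insert yc.1 (nd.getD yc.1 0 + yc.2 * f)).insert (PySem.Int.bxor yc.1 val)
            ((nd.insert yc.1 (nd.getD yc.1 0 + yc.2 * f)).getD (PySem.Int.bxor yc.1 val) 0 + yc.2 * f)) nd).getD y 0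
        = nd.getD y 0
          + (if y ∈ ps.map Prod.fst then dp.getD y 0 * f else 0)
          + (if PySem.Int.bxor y val ∈ ps.map Prod.fst then dp.getD (PySem.Int.bxor y val) 0 * f else 0) := by
  intro ps
  induction ps with
  | nil => intro _ _ nd y; simp
  | cons p ps ih =>
    intro hnd hv nd y
    obtain ⟨k, c⟩ := p
    have hc : c = dp.getD k 0 := hv (k, c) (List.mem_cons_self)
    rw [List.map_cons] at hnd
    have hk : k ∉ ps.map Prod.fst := (List.nodup_cons.mp hnd).1
    have hnd' : (ps.map Prod.fst).Nodup := (List.nodup_cons.mp hnd).2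
    have hv' : ∀ q ∈ ps, q.2 = dp.getD q.1 0 := fun q hq => hv q (List.mem_cons_of_mem _ hq)
    rw [List.foldl_cons, ih hnd' hv']
    have key : ((nd.insert k (nd.getD k 0 + c * f)).insert (PySem.Int.bxor k val)
          ((nd.insert k (nd.getD k 0 + c * f)).getD (PySem.Int.bxor k val) 0 + c * f)).getD y 0
        = nd.getD y 0 + (if y = k then c * f else 0)
          + (if PySem.Int.bxor y val = k then c * f else 0) := by
      have hyz : (y = PySem.Int.bxor k val) ↔ (PySem.Int.bxor y val = k) :=
        ⟨fun h => by rw [h, pvBxor_cancel], fun h => by rw [← h, pvBxor_cancel]⟩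
      simp only [PySem.Dict.getD_insert]
      by_cases h2 : PySem.Int.bxor y val = k
      · rw [if_pos (hyz.mpr h2), if_pos h2]
        by_cases h1 : y = k
        · have hzk : PySem.Int.bxor k val = k := by rw [← hyz.mpr h2, h1]
          rw [if_pos hzk, if_pos h1, h1]
        · have hzk : ¬ (PySem.Int.bxor k val = k) := fun h => h1 ((hyz.mpr h2).trans h)
          rw [if_neg hzk, if_neg h1, ← hyz.mpr h2]
          ring
      · rw [if_neg (fun h => h2 (hyz.mp h)), if_neg h2]
        by_cases h1 : y = k
        · rw [if_pos h1, if_pos h1, h1]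
          ring
        · rw [if_neg h1, if_neg h1]
          ring
    rw [key, hc]
    simp only [List.map_cons, List.mem_cons]
    by_cases h1 : y = k <;> by_cases h2 : PySem.Int.bxor y val = k
    · rw [if_pos h1, if_pos h2, if_pos (Or.inl h1), if_pos (Or.inl h2), h2, h1, if_neg hk]
      ring
    · rw [if_pos h1, if_neg h2, if_pos (Or.inl h1),
        if_congr (or_iff_right h2) rfl rfl, h1, if_neg hk]
      ring
    · rw [if_neg h1, if_pos h2, if_congr (or_iff_right h1) rfl rfl,
        if_pos (Or.inl h2), h2, if_neg hk]
      ring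
    · rw [if_neg h1, if_neg h2, if_congr (or_iff_right h1) rfl rfl,
        if_congr (or_iff_right h2) rfl rfl]
      ring

theorem pvFoldIns2_nodup (val f : Int) :
    ∀ (ps : List (Int × Int)) (nd : PySem.Dict Int Int), nd.keys.Nodup →
      (ps.foldl (fun nd yc =>
          (nd.insert yc.1 (nd.getD yc.1 0 + yc.2 * f)).insert (PySem.Int.bxor yc.1 val)
            ((nd.insert yc.1 (nd.getD yc.1 0 + yc.2 * f)).getD (PySem.Int.bxor yc.1 val) 0 + yc.2 * f)) nd).keys.Nodup := by
  intro ps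
  induction ps with
  | nil => intro nd h; exact h
  | cons p ps ih =>
    intro nd h
    exact ih _ (PySem.Dict.nodup_keys_insert _ _ _ (PySem.Dict.nodup_keys_insert _ _ _ h))

theorem pvStepB_keys_nodup (dp : PySem.Dict Int Int) (vm : Int × Int) :
    (pvStepB dp vm).keys.Nodup := by
  exact pvFoldIns2_nodup vm.1 ((1 : Int) <<< (vm.2 - 1).toNat) dp.items PySem.Dict.empty
    PySem.Dict.nodup_keys_empty

theorem pvStepB_getD (dp : PySem.Dict Int Int) (val m : Int) (h : dp.keys.Nodup) (y : Int) :
    (pvStepB dp (val, m)).getD y 0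
      = ((1 : Int) <<< (m - 1).toNat) * (dp.getD y 0 + dp.getD (PySem.Int.bxor y val) 0) := by
  have hkeys : dp.items.map Prod.fst = dp.keys := rfl
  have hb := pvInnerB dp val ((1 : Int) <<< (m - 1).toNat) dp.items (by rw [hkeys]; exact h)
    (fun p hp => (by
      obtain ⟨k, v⟩ := p
      exact (PySem.Dict.getD_of_mem_items dp hp h 0).symm))
    PySem.Dict.empty y
  have final : (pvStepB dp (val, m)).getD y 0
      = PySem.Dict.empty.getD y 0
        + (if y ∈ dp.items.map Prod.fst then dp.getD y 0 * ((1 : Int) <<< (m - 1).toNat) else 0)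
        + (if PySem.Int.bxor y val ∈ dp.items.map Prod.fst then
            dp.getD (PySem.Int.bxor y val) 0 * ((1 : Int) <<< (m - 1).toNat) else 0) := hb
  rw [hkeys] at final
  have helim : ∀ z : Int, (if z ∈ dp.keys then dp.getD z 0 * ((1 : Int) <<< (m - 1).toNat) else 0)
      = dp.getD z 0 * ((1 : Int) <<< (m - 1).toNat) := by
    intro z
    by_cases hz : z ∈ dp.keys
    · rw [if_pos hz]
    · have hc : dp.contains z = false := by
        rw [← Bool.not_eq_true, PySem.Dict.contains_iff_mem_keys]; exact hz
      rw [if_neg hz, PySem.Dict.getD_of_not_contains _ _ hc]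
      ring
  rw [final, helim, helim, PySem.Dict.getD_empty]
  ring

theorem pvOuterB : ∀ (its : List (Int × Int)) (dp : PySem.Dict Int Int) (q : List Int),
    dp.keys.Nodup → (∀ p ∈ its, 1 ≤ p.2) → (∀ y, dp.getD y 0 = pvCnt q y) →
    ∀ y, (its.foldl pvStepB dp).getD y 0
      = pvCnt (its.flatMap (fun p => List.replicate p.2.toNat p.1) ++ q) y := by
  intro its
  induction its with
  | nil => intro dp q _ _ hdp y; simpa using hdp y
  | cons p its ih =>
    intro dp q hnd hpos hdp y
    obtain ⟨val, m⟩ := p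
    have hm : 1 ≤ m := hpos (val, m) (List.mem_cons_self)
    have hmn : 1 ≤ m.toNat := by omega
    have hstep : ∀ y, (pvStepB dp (val, m)).getD y 0
        = pvCnt (List.replicate m.toNat val ++ q) y := by
      intro y
      rw [pvStepB_getD dp val m hnd y, pvCnt_replicate val q m.toNat hmn y,
        Int.shiftLeft_eq, hdp y, hdp (PySem.Int.bxor y val)]
      have hexp : (m - 1).toNat = m.toNat - 1 := by omega
      rw [hexp]
      ring
    have := ih (pvStepB dp (val, m)) (List.replicate m.toNat val ++ q)
      (pvStepB_keys_nodup dp (val, m))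
      (fun p hp => hpos p (List.mem_cons_of_mem _ hp)) hstep y
    rw [List.foldl_cons, this]
    refine pvCnt_perm ?_ y
    have hperm : ((its.flatMap (fun p => List.replicate p.2.toNat p.1)
          ++ List.replicate m.toNat val) ++ q).Perm
        (((val, m) :: its).flatMap (fun p => List.replicate p.2.toNat p.1) ++ q) := by
      rw [List.flatMap_cons]
      exact (List.perm_append_comm).append_right q
    rw [← List.append_assoc]
    exact hperm

theorem pvCounterFlat (nums : List Int) :
    ((PySem.Dict.counter nums).items.flatMap (fun p => List.replicate p.2.toNat p.1)).Perm nums := by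
  rw [PySem.Dict.items_counter, List.flatMap_map]
  have hcount : ∀ (S : List Int), S.Nodup → ∀ x : Int,
      (S.flatMap (fun k => List.replicate ((nums.count k : Int)).toNat k)).count x
        = if x ∈ S then nums.count x else 0 := by
    intro S
    induction S with
    | nil => intro _ x; simp
    | cons k S ih =>
      intro hnd x
      have hk : k ∉ S := (List.nodup_cons.mp hnd).1
      rw [List.flatMap_cons, List.count_append, ih (List.nodup_cons.mp hnd).2 x]
      by_cases hx : x = k
      · subst hx
        rw [if_pos (List.mem_cons_self), if_neg hk, List.count_replicate]
        simp
      · have hkx : (k == x) = false := by simpa using fun h => hx h.symm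
        rw [List.count_replicate, hkx]
        simp [List.mem_cons, hx]
  rw [List.perm_iff_count]
  intro x
  rw [hcount (PySem.Set.ofList nums) (PySem.Set.nodup_ofList nums) x]
  by_cases hx : x ∈ nums
  · rw [if_pos ((PySem.Set.mem_ofList nums x).mpr hx)]
  · rw [if_neg (fun h => hx ((PySem.Set.mem_ofList nums x).mp h))]
    exact (List.count_eq_zero.mpr hx).symm

theorem pvSolutionB (nums : List Int) : solution_alt nums = pvCnt nums 0 - 1 := by
  unfold solution_alt
  have hk : (PySem.Dict.empty.insert (0 : Int) (1 : Int)).keys = [0] := by decide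
  have hnd : (PySem.Dict.empty.insert (0 : Int) (1 : Int)).keys.Nodup := by rw [hk]; decide
  have hdp : ∀ y, (PySem.Dict.empty.insert (0 : Int) (1 : Int)).getD y 0 = pvCnt [] y := by
    intro y
    rw [PySem.Dict.getD_insert]
    by_cases h : y = 0 <;> simp [pvCnt, h]
  have hpos : ∀ p ∈ (PySem.Dict.counter nums).items, 1 ≤ p.2 := by
    intro p hp
    rw [PySem.Dict.items_counter] at hp
    obtain ⟨k, hkmem, rfl⟩ := List.mem_map.mp hp
    have hmem : k ∈ nums := (PySem.Set.mem_ofList nums k).mp hkmem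
    have hgoal : (1 : Int) ≤ ((List.count k nums : Nat) : Int) := by
      exact_mod_cast List.count_pos_iff.mpr hmem
    exact hgoal
  rw [pvOuterB (PySem.Dict.counter nums).items _ [] hnd hpos hdp 0, List.append_nil,
    pvCnt_perm (pvCounterFlat nums) 0]

-- ===== VERDICT (by name: the statement is the Claim_ definition above) =====
theorem solution_spec : Claim_equal_solution := by
  intro nums _
  unfold Spec_solution
  rw [pvSolutionA nums, pvSolutionB nums]
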